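-- pv_equiv track=rewrite | github.com/kudupudimohankumar/AMD_sample | agentic_scheduler.py | _get_time_preference_weights
-- ===== SOURCE A (Python) =====
-- from typing import Dict, List, Tuple, Optional, Any
--
-- def _get_time_preference_weights(time_preference: str) -> Dict[int, int]:
--     """Get optimization weights based on time preference (business hours 9 AM - 6 PM)."""
--     weights = {}
--     SLOT_DURATION = 15
--     BUSINESS_START_HOUR = 9
--
--     if time_preference == "morning":
--         # Weight morning slots (9 AM - 12 PM) higher - slots 0-11
--         for hour in range(9, 12):
--             for min_slot in range(0, 60, SLOT_DURATION):
--                 # Convert to business hours slot (offset by 9 AM)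
--                 slot = (((hour - BUSINESS_START_HOUR) * 60) + min_slot) // SLOT_DURATION
--                 weights[slot] = 10
--     elif time_preference == "afternoon":
--         # Weight afternoon slots (12 PM - 5 PM) higher - slots 12-31
--         for hour in range(12, 17):
--             for min_slot in range(0, 60, SLOT_DURATION):
--                 # Convert to business hours slot (offset by 9 AM)
--                 slot = (((hour - BUSINESS_START_HOUR) * 60) + min_slot) // SLOT_DURATION
--                 weights[slot] = 10
--     elif time_preference == "evening":
--         # Weight late afternoon/early evening (4 PM - 6 PM) higher - slots 28-35
--         for hour in range(16, 18):
--             for min_slot in range(0, 60, SLOT_DURATION):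
--                 # Convert to business hours slot (offset by 9 AM)
--                 slot = (((hour - BUSINESS_START_HOUR) * 60) + min_slot) // SLOT_DURATION
--                 weights[slot] = 10
--
--     return weights
-- ===== SOURCE B (Python) =====
-- _SLOT_RANGES = {"morning": range(0, 12), "afternoon": range(12, 32), "evening": range(28, 36)}
--
-- def _get_time_preference_weights(time_preference: str):
--     """Table-driven: one slot range per preference, weight 10 each."""
--     return {slot: 10 for slot in _SLOT_RANGES.get(time_preference, range(0))}
-- ===== Notes on version B (the rewrite author's own statement) =====
-- stated objective: simpler
-- what changed: Replaces the three branch-specific nested hour/minute loops with slot arithmetic by a single preference-to-range lookup table and one comprehension over the closed-form slot range.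
import Mathlib
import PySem

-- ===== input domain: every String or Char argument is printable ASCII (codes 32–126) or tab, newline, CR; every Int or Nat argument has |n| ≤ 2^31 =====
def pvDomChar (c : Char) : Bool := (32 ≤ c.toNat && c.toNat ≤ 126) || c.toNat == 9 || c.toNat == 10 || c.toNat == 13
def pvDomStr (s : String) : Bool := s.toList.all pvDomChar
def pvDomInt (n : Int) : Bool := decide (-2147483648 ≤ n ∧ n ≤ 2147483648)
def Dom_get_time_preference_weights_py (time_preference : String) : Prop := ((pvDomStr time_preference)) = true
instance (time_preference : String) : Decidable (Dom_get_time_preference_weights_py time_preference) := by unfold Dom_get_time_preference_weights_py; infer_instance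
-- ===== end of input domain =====

-- B replaces the nested hour/minute loops with a preference→slot-range table and one comprehension (objective: simpler).


-- ===== PORT A =====
-- Port of A: nested loops over hours/minute-offsets, dict insert of computed slot.
def pvInnerLoopA (hour : Int) (w : PySem.Dict Int Int) : PySem.Dict Int Int :=
  (PySem.List.pyRange 0 60 15).foldl
    (fun w min_slot => w.insert (PySem.Int.floordiv (((hour - 9) * 60) + min_slot) 15) 10) w

def get_time_preference_weights_py (time_preference : String) : List (Int × Int) :=
  let weights : PySem.Dict Int Int := PySem.Dict.empty
  if time_preference = "morning" then
    ((PySem.List.pyRange 9 12 1).foldl (fun w hour => pvInnerLoopA hour w) weights).items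
  else if time_preference = "afternoon" then
    ((PySem.List.pyRange 12 17 1).foldl (fun w hour => pvInnerLoopA hour w) weights).items
  else if time_preference = "evening" then
    ((PySem.List.pyRange 16 18 1).foldl (fun w hour => pvInnerLoopA hour w) weights).items
  else
    weights.items

-- ===== PORT B =====
-- Port of B: table of (preference, slot range); dict comprehension over the looked-up range.
def pvSlotRanges : PySem.Dict String (Int × Int) :=
  PySem.Dict.ofList [("morning", (0, 12)), ("afternoon", (12, 32)), ("evening", (28, 36))]

def get_time_preference_weights_py_alt (time_preference : String) : List (Int × Int) :=
  let r := (pvSlotRanges.get? time_preference).getD (0, 0)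
  ((PySem.List.pyRange r.1 r.2 1).foldl
    (fun (d : PySem.Dict Int Int) slot => d.insert slot 10) PySem.Dict.empty).items


-- ===== PRECONDITION & SPEC =====
def Spec_get_time_preference_weights_py (time_preference : String) (out : List (Int × Int)) : Prop := out = get_time_preference_weights_py_alt time_preference
instance (time_preference : String) (out : List (Int × Int)) : Decidable (Spec_get_time_preference_weights_py time_preference out) := by unfold Spec_get_time_preference_weights_py; infer_instance

-- ===== CLAIM (what is proved, stated in full; the proofs are below) =====
def Claim_equal_get_time_preference_weights_py : Prop := ∀ (time_preference : String), Dom_get_time_preference_weights_py time_preference → Spec_get_time_preference_weights_py time_preference (get_time_preference_weights_py time_preference)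

-- ===== LEMMAS AND PROOFS =====

-- ===== VERDICT (by name: the statement is the Claim_ definition above) =====
theorem get_time_preference_weights_py_spec : Claim_equal_get_time_preference_weights_py := by
  intro s _
  unfold Spec_get_time_preference_weights_py
  by_cases h1 : s = "morning"
  · subst h1; decide
  · by_cases h2 : s = "afternoon"
    · subst h2; decide
    · by_cases h3 : s = "evening"
      · subst h3; decide
      · have hb1 : (("morning" : String) == s) = false := by simp [Ne.symm h1]
        have hb2 : (("afternoon" : String) == s) = false := by simp [Ne.symm h2]
        have hb3 : (("evening" : String) == s) = false := by simp [Ne.symm h3]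
        simp [get_time_preference_weights_py, get_time_preference_weights_py_alt,
          pvSlotRanges, PySem.Dict.ofList, PySem.Dict.update, PySem.Dict.get?,
          PySem.Dict.empty, PySem.Dict.insert, PySem.List.pyRange, List.find?,
          hb1, hb2, hb3, h1, h2, h3]
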